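-- pv_equiv track=rewrite | github.com/Sriram-52/InfyTq | Assignement-4/Prg2.py | encrypt_sentence
-- ===== SOURCE A (Python) =====
-- def is_vowel(ch):
--     if ch in ['a', 'e', 'i', 'o', 'u']:
--         return True
--     if ch in ['A', 'E', 'I', 'O', 'U']:
--         return True
--     return False
--
-- def encrypt_sentence(sentence):
--     words = sentence.split()
--     s = ""
--     for i in range(len(words)):
--         if (i + 1) % 2:
--             words[i] = words[i][::-1]
--         else:
--             vowels = []
--             temp = ""
--             for ch in words[i]:
--                 if is_vowel(ch):
--                     vowels.append(ch)
--                 else: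
--                     temp += ch
--             temp += "".join(vowels)
--             words[i] = temp
--     return " ".join(words)
-- ===== SOURCE B (Python) =====
-- def is_vowel(ch):
--     if ch in ['a', 'e', 'i', 'o', 'u']:
--         return True
--     if ch in ['A', 'E', 'I', 'O', 'U']:
--         return True
--     return False
--
-- def encrypt_sentence(sentence):
--     return " ".join(
--         word[::-1] if i % 2 == 0 else "".join(sorted(word, key=is_vowel))
--         for i, word in enumerate(sentence.split())
--     )
-- ===== Notes on version B (the rewrite author's own statement) =====
-- stated objective: idiomatic
-- what changed: Replaces A's index-based list mutation and explicit consonant/vowel accumulator loop with a single enumerate comprehension that reverses even-indexed words by slicing and partitions the others via a stable sort keyed on is_vowel.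
import Mathlib
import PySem

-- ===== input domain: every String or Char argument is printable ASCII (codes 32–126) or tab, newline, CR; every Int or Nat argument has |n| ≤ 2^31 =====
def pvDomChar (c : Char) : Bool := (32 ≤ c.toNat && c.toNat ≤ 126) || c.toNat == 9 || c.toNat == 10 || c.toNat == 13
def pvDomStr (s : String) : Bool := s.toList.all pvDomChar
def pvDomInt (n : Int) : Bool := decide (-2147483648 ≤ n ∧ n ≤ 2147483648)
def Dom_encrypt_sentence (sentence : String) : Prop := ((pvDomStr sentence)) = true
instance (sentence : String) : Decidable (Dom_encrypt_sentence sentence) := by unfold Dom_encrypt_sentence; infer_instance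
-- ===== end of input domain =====

-- B reverses even-indexed words by slicing and partitions the rest with a stable sort keyed on is_vowel,
-- replacing A's index-mutation loop and explicit vowel/consonant accumulators (idiomatic; same results).

-- ===== PORT A =====
def is_vowel (ch : Char) : Bool :=
  if ch ∈ ['a', 'e', 'i', 'o', 'u'] then true
  else if ch ∈ ['A', 'E', 'I', 'O', 'U'] then true
  else false

def encrypt_sentence (sentence : String) : String :=
  let words := PySem.Chars.split₀ sentence.toList
  let words :=
    (PySem.List.pyRange 0 (PySem.List.len words) 1).foldl (fun ws i =>
      if PySem.Int.mod (i + 1) 2 ≠ 0 then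
        PySem.List.pySetD ws i ((PySem.List.slice? (PySem.List.pyGetD ws i []) none none (-1)).getD [])
      else
        let vt := (PySem.List.pyGetD ws i []).foldl
          (fun (vt : List Char × List Char) ch =>
            if is_vowel ch then (vt.1 ++ [ch], vt.2) else (vt.1, vt.2 ++ [ch]))
          ([], [])
        PySem.List.pySetD ws i (vt.2 ++ vt.1)) words
  String.ofList (PySem.Chars.join [' '] words)

-- ===== PORT B =====
def encrypt_sentence_alt (sentence : String) : String :=
  String.ofList (PySem.Chars.join [' ']
    ((PySem.List.enumerate (PySem.Chars.split₀ sentence.toList) 0).map (fun p =>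
      if PySem.Int.mod p.1 2 = 0 then
        (PySem.List.slice? p.2 none none (-1)).getD []
      else
        PySem.List.sorted p.2 (fun c => is_vowel c) false)))

-- ===== PRECONDITION & SPEC =====
def Spec_encrypt_sentence (sentence : String) (out : String) : Prop := out = encrypt_sentence_alt sentence
instance (sentence : String) (out : String) : Decidable (Spec_encrypt_sentence sentence out) := by unfold Spec_encrypt_sentence; infer_instance

-- ===== CLAIM (what is proved, stated in full; the proofs are below) =====
def Claim_equal_encrypt_sentence : Prop := ∀ (sentence : String), Dom_encrypt_sentence sentence → Spec_encrypt_sentence sentence (encrypt_sentence sentence)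

-- ===== LEMMAS AND PROOFS =====

-- inserting an element that 'before' rejects against everything goes to the end
theorem insertBy_all_false {α : Type} (before : α → α → Bool) (x : α) :
    ∀ (l : List α), (∀ y ∈ l, before x y = false) → PySem.List.insertBy before x l = l ++ [x] := by
  intro l
  induction l with
  | nil => intro _; rfl
  | cons y ys ih =>
    intro h
    simp [PySem.List.insertBy, h y (by simp)]
    exact ih (fun z hz => h z (by simp [hz]))

theorem insertBy_append_cons {α : Type} (before : α → α → Bool) (x y : α) :
    ∀ (l₁ l₂ : List α), (∀ z ∈ l₁, before x z = false) → before x y = true →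
      PySem.List.insertBy before x (l₁ ++ y :: l₂) = l₁ ++ x :: y :: l₂ := by
  intro l₁
  induction l₁ with
  | nil => intro l₂ _ hy; simp [PySem.List.insertBy, hy]
  | cons z zs ih =>
    intro l₂ h hy
    simp [PySem.List.insertBy, h z (by simp)]
    exact ih l₂ (fun w hw => h w (by simp [hw])) hy

-- stable sort on the Bool key is the partition: consonants first, vowels after, each in input order
theorem sorted_is_vowel (w : List Char) :
    PySem.List.sorted w (fun c => is_vowel c) false =
      w.filter (fun c => !is_vowel c) ++ w.filter (fun c => is_vowel c) := by
  induction w using List.reverseRecOn with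
  | nil => rfl
  | append_singleton xs x ih =>
    rw [PySem.List.sorted_eq_foldl_insertBy] at ih ⊢
    rw [List.foldl_append, List.foldl_cons, List.foldl_nil, ih]
    by_cases hv : is_vowel x = true
    · rw [insertBy_all_false]
      · simp [List.filter_append, hv]
      · intro y _
        simp [hv, Bool.lt_iff]
    · simp only [Bool.not_eq_true] at hv
      rcases h2 : xs.filter (fun c => is_vowel c) with _ | ⟨y, rest⟩
      · rw [List.append_nil, insertBy_all_false]
        · simp [List.filter_append, hv, h2]
        · intro y hy
          simp only [List.mem_filter, Bool.not_eq_true'] at hy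
          simp [hv, hy.2]
      · have hyv : is_vowel y = true := by
          have : y ∈ xs.filter (fun c => is_vowel c) := by rw [h2]; exact List.mem_cons_self
          exact (List.mem_filter.mp this).2
        rw [insertBy_append_cons]
        · simp [List.filter_append, hv, h2]
        · intro z hz
          simp only [List.mem_filter, Bool.not_eq_true'] at hz
          simp [hv, hz.2]
        · simp [hv, hyv, Bool.lt_iff]

-- A's inner accumulator loop is the two filters
theorem partition_fold (w : List Char) :
    ∀ (v t : List Char),
      w.foldl (fun (vt : List Char × List Char) ch =>
          if is_vowel ch then (vt.1 ++ [ch], vt.2) else (vt.1, vt.2 ++ [ch])) (v, t)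
        = (v ++ w.filter (fun c => is_vowel c), t ++ w.filter (fun c => !is_vowel c)) := by
  induction w with
  | nil => intro v t; simp
  | cons c w ih =>
    intro v t
    by_cases hc : is_vowel c = true <;> simp [List.foldl_cons, hc, ih]

-- the index-update loop over range(len(ws)) is a map over enumerate
theorem loop_map (f : Int → List Char → List Char) :
    ∀ (suf pre : List (List Char)),
      (PySem.List.pyRange (pre.length : Int) ((pre.length : Int) + (suf.length : Int)) 1).foldl
        (fun acc i => PySem.List.pySetD acc i (f i (PySem.List.pyGetD acc i []))) (pre ++ suf)
      = pre ++ (PySem.List.enumerate suf (pre.length : Int)).map (fun p => f p.1 p.2) := by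
  intro suf
  induction suf with
  | nil =>
    intro pre
    simp only [List.length_nil, Nat.cast_zero, add_zero]
    simp [PySem.List.pyRange_one_eq_nil le_rfl, PySem.List.enumerate_nil]
  | cons w suf ih =>
    intro pre
    rw [PySem.List.pyRange_one_cons (by push_cast [List.length_cons]; omega), List.foldl_cons]
    have hget : PySem.List.pyGetD (pre ++ w :: suf) (pre.length : Int) [] = w := by
      simp [PySem.List.pyGetD_natCast, List.getD_eq_getElem?_getD]
    have hset : PySem.List.pySetD (pre ++ w :: suf) (pre.length : Int) (f (pre.length : Int) w)
        = (pre ++ [f (pre.length : Int) w]) ++ suf := by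
      simp [PySem.List.pySetD_natCast]
    rw [hget, hset]
    have harith : ((pre.length : Int) + 1) = (((pre ++ [f (pre.length : Int) w]).length : Nat) : Int) := by
      simp
    have hbound : ((pre.length : Int) + ((w :: suf).length : Int)) =
        (((pre ++ [f (pre.length : Int) w]).length : Nat) : Int) + ((suf.length : Nat) : Int) := by
      simp; omega
    rw [harith, hbound] at *
    rw [ih (pre ++ [f (pre.length : Int) w])]
    simp [PySem.List.enumerate_cons]

-- ===== VERDICT (by name: the statement is the Claim_ definition above) =====
theorem encrypt_sentence_spec : Claim_equal_encrypt_sentence := by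
  intro sentence _
  unfold Spec_encrypt_sentence encrypt_sentence encrypt_sentence_alt
  have h0 := loop_map
    (fun i w =>
      if PySem.Int.mod (i + 1) 2 ≠ 0 then
        (PySem.List.slice? w none none (-1)).getD []
      else
        let vt := w.foldl
          (fun (vt : List Char × List Char) ch =>
            if is_vowel ch then (vt.1 ++ [ch], vt.2) else (vt.1, vt.2 ++ [ch]))
          ([], [])
        vt.2 ++ vt.1)
    (PySem.Chars.split₀ sentence.toList) []
  simp only [List.length_nil, Nat.cast_zero, List.nil_append, zero_add] at h0
  simp only [PySem.List.len_eq]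
  rw [show (fun (ws : List (List Char)) (i : Int) =>
      if PySem.Int.mod (i + 1) 2 ≠ 0 then
        PySem.List.pySetD ws i ((PySem.List.slice? (PySem.List.pyGetD ws i []) none none (-1)).getD [])
      else
        let vt := (PySem.List.pyGetD ws i []).foldl
          (fun (vt : List Char × List Char) ch =>
            if is_vowel ch then (vt.1 ++ [ch], vt.2) else (vt.1, vt.2 ++ [ch]))
          ([], [])
        PySem.List.pySetD ws i (vt.2 ++ vt.1)) = (fun ws i =>
      PySem.List.pySetD ws i (if PySem.Int.mod (i + 1) 2 ≠ 0 then
        (PySem.List.slice? (PySem.List.pyGetD ws i []) none none (-1)).getD []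
      else
        let vt := (PySem.List.pyGetD ws i []).foldl
          (fun (vt : List Char × List Char) ch =>
            if is_vowel ch then (vt.1 ++ [ch], vt.2) else (vt.1, vt.2 ++ [ch]))
          ([], [])
        vt.2 ++ vt.1)) from by
    funext ws i
    exact (apply_ite (PySem.List.pySetD ws i) _ _ _).symm]
  rw [h0]
  apply congrArg
  apply congrArg
  apply List.map_congr_left
  intro p hp
  rw [PySem.List.mem_enumerate_iff] at hp
  obtain ⟨k, hk, rfl⟩ := hp
  simp only [zero_add]
  have hm1 : PySem.Int.mod ((k : Int) + 1) 2 = (((k + 1) % 2 : Nat) : Int) := by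
    exact_mod_cast PySem.Int.mod_natCast (k + 1) 2
  have hm0 : PySem.Int.mod (k : Int) 2 = ((k % 2 : Nat) : Int) := by
    exact_mod_cast PySem.Int.mod_natCast k 2
  by_cases hk2 : k % 2 = 0
  · have h1 : (k + 1) % 2 = 1 := by omega
    simp only [hm1, hm0, h1, hk2, Nat.cast_one, Nat.cast_zero]
    simp
  · have h1 : (k + 1) % 2 = 0 := by omega
    have hk1 : k % 2 = 1 := by omega
    simp only [hm1, hm0, h1, hk1, Nat.cast_one, Nat.cast_zero]
    simp [partition_fold, sorted_is_vowel]
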